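-- pv_equiv track=rewrite | github.com/k-t-l-h/MathModeling | RandomNumbers/stats.py | num_freq_test
-- ===== SOURCE A (Python) =====
-- def num_freq_test(arr):
--     n = len(arr)
--     C = [0]*10
--
--     for i in range(n):
--         t = str(i)
--         for j in t:
--             C[int(j)] += 1
--
--     for i in C:
--         i -= 0.1
--         i /= sum(C)
--
--     return max(C) + abs(min(C))
-- ===== SOURCE B (Python) =====
-- def _cntpos(d, i):
--     # occurrences of digit d in the decimal representation of i (i >= 1; returns 0 for i == 0)
--     if i == 0:
--         return 0
--     return (1 if i % 10 == d else 0) + _cntpos(d, i // 10)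
--
--
-- def _count_from_one(d, m):
--     # occurrences of digit d over str(1) .. str(m-1), via the positional closed form
--     if m <= 1:
--         return 0
--     q, r = divmod(m, 10)
--     units = q + (1 if r > d else 0) - (1 if d == 0 else 0)
--     return units + r * _cntpos(d, q) + 10 * _count_from_one(d, q)
--
--
-- def num_freq_test(arr):
--     n = len(arr)
--     if n == 0:
--         return 0
--     counts = [(1 if d == 0 else 0) + _count_from_one(d, n) for d in range(10)]
--     return max(counts) + min(counts)
-- ===== Notes on version B (the rewrite author's own statement) =====
-- stated objective: faster
-- what changed: A enumerates 0..n-1 and counts the digits of each stringified number (its second loop is dead code); B computes each digit's total frequency over 0..n-1 with the positional closed-form recurrence on n (one divmod-by-10 level per decimal digit), then takes max+min of the ten counts.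
-- outside the precondition, e.g. on num_freq_test([]): A raises ZeroDivisionError, B returns 0
import Mathlib
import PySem

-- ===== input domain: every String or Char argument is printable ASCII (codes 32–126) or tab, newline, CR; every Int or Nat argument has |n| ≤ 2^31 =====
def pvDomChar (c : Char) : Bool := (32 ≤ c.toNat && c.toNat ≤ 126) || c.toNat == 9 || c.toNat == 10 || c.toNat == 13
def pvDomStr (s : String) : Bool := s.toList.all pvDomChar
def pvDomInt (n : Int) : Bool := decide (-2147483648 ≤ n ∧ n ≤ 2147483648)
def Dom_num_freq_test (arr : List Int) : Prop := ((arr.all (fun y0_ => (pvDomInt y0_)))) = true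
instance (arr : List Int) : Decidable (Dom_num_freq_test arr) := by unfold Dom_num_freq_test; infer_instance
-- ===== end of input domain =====

-- B replaces A's per-number digit-count loop over 0..n-1 by the positional closed-form
-- recurrence (O(log^2 n) vs O(n log n)); A's dead second loop only raises on the empty list.


-- ===== PORT A =====
-- body of A's inner loop: 'for j in t: C[int(j)] += 1'  (j is one char of str(i))
def pvStepCharA (C : List Int) (j : Char) : List Int :=
  let k := (PySem.Int.ofStr? j.toString).getD 0   -- int(j); j is always a digit char here, so never none
  PySem.List.pySetD C k (PySem.List.pyGetD C k 0 + 1)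

-- body of A's outer loop over i in range(n)
def pvStepA (C : List Int) (i : Int) : List Int :=
  (PySem.Int.toStr i).toList.foldl pvStepCharA C          -- t = str(i); for j in t: …

def num_freq_test (arr : List Int) : Int :=
  let n : Int := (arr.length : Int)
  let C0 : List Int := List.replicate 10 0                       -- C = [0]*10
  let C := (PySem.List.pyRange 0 n 1).foldl pvStepA C0
  -- 'for i in C: i -= 0.1; i /= sum(C)' rebinds only the loop variable, so it never changes C;
  -- it raises ZeroDivisionError iff sum(C) = 0, i.e. iff arr = [] — excluded by Pre_ below.
  ((PySem.List.max? C (fun x => x)).getD 0) + |(PySem.List.min? C (fun x => x)).getD 0|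

-- ===== PORT B =====
-- _cntpos(d, i): occurrences of digit d in i (0 for i = 0)
def pvCnt (d : Nat) (i : Nat) : Nat :=
  if i = 0 then 0 else (if i % 10 = d then 1 else 0) + pvCnt d (i / 10)
decreasing_by exact Nat.div_lt_self (Nat.pos_of_ne_zero (by assumption)) (by norm_num)

-- _count_from_one(d, m): occurrences of digit d over str(1)..str(m-1)
def pvCountFromOne (d : Nat) (m : Nat) : Nat :=
  if m ≤ 1 then 0
  else
    (m / 10 + (if d < m % 10 then 1 else 0) - (if d = 0 then 1 else 0))
      + (m % 10) * pvCnt d (m / 10) + 10 * pvCountFromOne d (m / 10)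
decreasing_by exact Nat.div_lt_self (by omega) (by norm_num)

def num_freq_test_alt (arr : List Int) : Int :=
  let n := arr.length
  if n = 0 then 0
  else
    let counts : List Int :=
      (List.range 10).map (fun d => (((if d = 0 then 1 else 0) + pvCountFromOne d n : Nat) : Int))
    ((PySem.List.max? counts (fun x => x)).getD 0) + ((PySem.List.min? counts (fun x => x)).getD 0)

-- ===== PRECONDITION & SPEC =====
-- A's dead second loop divides by sum(C); sum(C) = 0 exactly when arr = [], where A raises
-- ZeroDivisionError. That is the only input excluded.
def Pre_num_freq_test (arr : List Int) : Prop := arr ≠ []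
instance (arr : List Int) : Decidable (Pre_num_freq_test arr) := by unfold Pre_num_freq_test; infer_instance
def pvWitness_num_freq_test : List Int := [3, -1]

def Spec_num_freq_test (arr : List Int) (out : Int) : Prop := out = num_freq_test_alt arr
instance (arr : List Int) (out : Int) : Decidable (Spec_num_freq_test arr out) := by unfold Spec_num_freq_test; infer_instance

-- ===== CLAIM (what is proved, stated in full; the proofs are below) =====
def Claim_equal_num_freq_test : Prop := ∀ (arr : List Int), Dom_num_freq_test arr → Pre_num_freq_test arr → Spec_num_freq_test arr (num_freq_test arr)

-- ===== LEMMAS AND PROOFS =====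

-- the count of digit d in str(i), i ≥ 0, as a number (0 counted as the single char '0')
def pvCntFull (d : Nat) (i : Nat) : Nat := if i = 0 then (if d = 0 then 1 else 0) else pvCnt d i

-- Σ_{i<n} pvCntFull d i
def pvS (d : Nat) : Nat → Nat
  | 0 => 0
  | n + 1 => pvS d n + pvCntFull d n

theorem pv_digitChar_inj {k d : Nat} (hk : k < 10) (hd : d < 10) :
    (Nat.digitChar k = Nat.digitChar d) ↔ k = d := by
  interval_cases k <;> interval_cases d <;> simp [Nat.digitChar]

theorem pv_charVal_digit {k : Nat} (hk : k < 10) :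
    (PySem.Int.ofStr? (Nat.digitChar k).toString).getD 0 = (k : Int) := by
  interval_cases k <;> decide

theorem pv_mem_toDigits {m : Nat} {c : Char} (hc : c ∈ Nat.toDigits 10 m) :
    ∃ k < 10, c = Nat.digitChar k := by
  induction m using Nat.strong_induction_on with
  | _ m ih =>
    by_cases h : m < 10
    · rw [Nat.toDigits_of_lt_base h] at hc
      simp at hc
      exact ⟨m, h, hc⟩
    · rw [Nat.toDigits_of_base_le (by norm_num) (by omega)] at hc
      rcases List.mem_append.1 hc with h1 | h1
      · exact ih (m / 10) (Nat.div_lt_self (by omega) (by norm_num)) h1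
      · simp at h1
        exact ⟨m % 10, Nat.mod_lt _ (by norm_num), h1⟩

-- counting digit chars in toDigits equals the arithmetic count
theorem pv_countP_toDigits (d : Nat) (hd : d < 10) (m : Nat) :
    (Nat.toDigits 10 m).countP (fun c => c = Nat.digitChar d) = pvCntFull d m := by
  induction m using Nat.strong_induction_on with
  | _ m ih =>
    have hsingle : ∀ k, k < 10 → List.countP (fun c => decide (c = Nat.digitChar d)) [Nat.digitChar k]
        = if k = d then 1 else 0 := by
      intro k hk
      rw [List.countP_singleton]
      by_cases he : k = d
      · simp [he]
      · have hne : Nat.digitChar k ≠ Nat.digitChar d := (pv_digitChar_inj hk hd).not.mpr he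
        simp [hne, he]
    by_cases h : m < 10
    · rw [Nat.toDigits_of_lt_base h, hsingle m h]
      by_cases hm : m = 0
      · subst hm
        simp [pvCntFull, eq_comm]
      · rw [pvCntFull, if_neg hm, pvCnt, if_neg hm, pvCnt,
            Nat.mod_eq_of_lt h, Nat.div_eq_of_lt h, if_pos rfl]
        by_cases he : m = d <;> simp [he]
    · rw [Nat.toDigits_of_base_le (by norm_num) (by omega), List.countP_append]
      rw [ih (m / 10) (Nat.div_lt_self (by omega) (by norm_num))]
      have h10 : m / 10 ≠ 0 := by omega
      rw [hsingle (m % 10) (Nat.mod_lt _ (by norm_num : 0 < 10))]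
      have e1 : pvCntFull d (m / 10) = pvCnt d (m / 10) := by rw [pvCntFull, if_neg h10]
      have e2 : pvCntFull d m = pvCnt d m := by rw [pvCntFull, if_neg (by omega : m ≠ 0)]
      have e3 : pvCnt d m = (if m % 10 = d then 1 else 0) + pvCnt d (m / 10) := by
        rw [pvCnt, if_neg (by omega : m ≠ 0)]
      rw [e1, e2, e3]
      omega

-- one char step of A on a table indexed by range 10
theorem pv_stepCharA_map (f : Nat → Int) {k : Nat} (hk : k < 10) :
    pvStepCharA ((List.range 10).map (fun d => f d)) (Nat.digitChar k)
      = (List.range 10).map (fun d => if d = k then f d + 1 else f d) := by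
  unfold pvStepCharA
  rw [pv_charVal_digit hk]
  rw [PySem.List.pySetD_natCast, PySem.List.pyGetD_natCast]
  apply List.ext_getElem
  · simp
  · intro i h1 h2
    simp at h1
    simp [List.getElem_set, List.getD]
    by_cases he : i = k
    · subst he
      rw [List.getElem?_range hk]
      simp
    · simp [he, Ne.symm he]

-- folding A's char step over any list of digit chars adds the per-digit char counts
theorem pv_fold_chars (L : List Char) (hL : ∀ c ∈ L, ∃ k < 10, c = Nat.digitChar k)
    (f : Nat → Int) :
    L.foldl pvStepCharA ((List.range 10).map (fun d => f d))
      = (List.range 10).map (fun d => f d + L.countP (fun c => c = Nat.digitChar d)) := by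
  induction L generalizing f with
  | nil => simp
  | cons c L ih =>
    obtain ⟨k, hk, rfl⟩ := hL c (List.mem_cons_self)
    rw [List.foldl_cons, pv_stepCharA_map f hk,
        ih (fun c hc => hL c (List.mem_cons_of_mem _ hc))]
    apply List.map_congr_left
    intro d hd
    simp at hd
    rw [List.countP_cons]
    by_cases he : d = k
    · subst he
      simp
      ring
    · simp [(pv_digitChar_inj hk hd).not.mpr (Ne.symm he), he]

-- one number step of A
theorem pv_stepA_map (f : Nat → Int) (i : Nat) :
    pvStepA ((List.range 10).map (fun d => f d)) (i : Int)
      = (List.range 10).map (fun d => f d + pvCntFull d i) := by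
  unfold pvStepA
  have ht : (PySem.Int.toStr (i : Int)).toList = Nat.toDigits 10 i := by
    rw [PySem.Int.toList_toStr, PySem.Int.toChars]
    simp
  rw [ht, pv_fold_chars _ (fun c hc => pv_mem_toDigits hc)]
  apply List.map_congr_left
  intro d hd
  simp at hd
  rw [pv_countP_toDigits d hd]

-- A's whole counting loop
theorem pv_loopA (n : Nat) :
    (PySem.List.pyRange 0 (n : Int) 1).foldl pvStepA (List.replicate 10 0)
      = (List.range 10).map (fun d => (pvS d n : Int)) := by
  have h0 : (List.replicate 10 (0 : Int)) = (List.range 10).map (fun _ => (0 : Int)) := by decide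
  rw [PySem.List.pyRange_zero_nat]
  induction n with
  | zero =>
    rw [h0]
    simp [pvS]
  | succ n ih =>
    rw [List.range_succ, List.map_append, List.foldl_append, ih]
    simp only [List.map_cons, List.map_nil, List.foldl_cons, List.foldl_nil]
    rw [pv_stepA_map]
    apply List.map_congr_left
    intro d hd
    simp [pvS]

-- ===== B-side: the closed form equals the sum =====

-- Σ_{1≤i<n} pvCnt d i
def pvS1 (d : Nat) : Nat → Nat
  | 0 => 0
  | n + 1 => pvS1 d n + (if n = 0 then 0 else pvCnt d n)

theorem pv_cnt_pos (d n : Nat) (hn : n ≠ 0) :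
    pvCnt d n = (if n % 10 = d then 1 else 0) + pvCnt d (n / 10) := by
  rw [pvCnt, if_neg hn]

-- unfold lemma for the closed form when m ≥ 2
theorem pvF_unfold (d m : Nat) (h : 2 ≤ m) :
    pvCountFromOne d m
      = (m / 10 + (if d < m % 10 then 1 else 0) - (if d = 0 then 1 else 0))
          + (m % 10) * pvCnt d (m / 10) + 10 * pvCountFromOne d (m / 10) := by
  rw [pvCountFromOne, if_neg (by omega)]

-- step property of the closed form
theorem pv_F_step (d : Nat) (hd : d < 10) (n : Nat) :
    pvCountFromOne d (n + 1) = pvCountFromOne d n + (if n = 0 then 0 else pvCnt d n) := by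
  induction n using Nat.strong_induction_on with
  | _ n ih =>
    rcases n with _ | n
    · simp [pvCountFromOne]
    rcases n with _ | m
    · interval_cases d <;> simp [pvCountFromOne, pvCnt]
    · -- n = m + 2
      by_cases hr : (m + 2) % 10 ≤ 8
      · -- no carry into the next decimal position
        have e1 : (m + 2 + 1) / 10 = (m + 2) / 10 := by omega
        have e2 : (m + 2 + 1) % 10 = (m + 2) % 10 + 1 := by omega
        rw [pvF_unfold d (m + 2 + 1) (by omega), pvF_unfold d (m + 2) (by omega), e1, e2,
            pv_cnt_pos d (m + 2) (by omega), if_neg (by omega : ¬ m + 2 = 0)]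
        have hmul : ((m + 2) % 10 + 1) * pvCnt d ((m + 2) / 10)
            = (m + 2) % 10 * pvCnt d ((m + 2) / 10) + pvCnt d ((m + 2) / 10) := by ring
        rw [hmul]
        generalize pvCountFromOne d ((m + 2) / 10) = F
        generalize (m + 2) % 10 * pvCnt d ((m + 2) / 10) = X
        generalize pvCnt d ((m + 2) / 10) = c
        split_ifs <;> omega
      · -- carry: (m+2) % 10 = 9
        have hr9 : (m + 2) % 10 = 9 := by omega
        by_cases hq0 : (m + 2) / 10 = 0
        · have hm : m = 7 := by omega
          subst hm
          interval_cases d <;> simp [pvCountFromOne, pvCnt]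
        · have e1 : (m + 2 + 1) / 10 = (m + 2) / 10 + 1 := by omega
          have e2 : (m + 2 + 1) % 10 = 0 := by omega
          rw [pvF_unfold d (m + 2 + 1) (by omega), pvF_unfold d (m + 2) (by omega), e1, e2, hr9,
              pv_cnt_pos d (m + 2) (by omega), if_neg (by omega : ¬ m + 2 = 0), hr9,
              ih ((m + 2) / 10) (by omega), if_neg hq0]
          generalize pvCountFromOne d ((m + 2) / 10) = F
          generalize pvCnt d ((m + 2) / 10 + 1) = c1
          generalize pvCnt d ((m + 2) / 10) = c
          have hq1 : 1 ≤ (m + 2) / 10 := by omega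
          split_ifs <;> omega

theorem pv_S1_eq_F (d : Nat) (hd : d < 10) (n : Nat) : pvS1 d n = pvCountFromOne d n := by
  induction n with
  | zero => simp [pvS1, pvCountFromOne]
  | succ n ih => rw [pvS1, ih, pv_F_step d hd n]

theorem pv_S_eq (d : Nat) (hd : d < 10) (n : Nat) (hn : n ≠ 0) :
    pvS d n = (if d = 0 then 1 else 0) + pvCountFromOne d n := by
  rw [← pv_S1_eq_F d hd n]
  induction n with
  | zero => omega
  | succ n ih =>
    by_cases h0 : n = 0
    · subst h0
      simp [pvS, pvS1, pvCntFull]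
    · rw [pvS, pvS1, ih h0, pvCntFull, if_neg h0, if_neg h0]
      ring

-- ===== VERDICT (by name: the statement is the Claim_ definition above) =====
theorem num_freq_test_spec : Claim_equal_num_freq_test := by
  intro arr _ hpre
  unfold Spec_num_freq_test num_freq_test num_freq_test_alt
  have hn : arr.length ≠ 0 := by
    intro h; exact hpre (List.eq_nil_of_length_eq_zero h)
  simp only [if_neg hn]
  rw [pv_loopA arr.length]
  have hlist : (List.range 10).map (fun d => (pvS d arr.length : Int))
      = (List.range 10).map (fun d => (((if d = 0 then 1 else 0) + pvCountFromOne d arr.length : Nat) : Int)) := by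
    apply List.map_congr_left
    intro d hd
    simp at hd
    rw [pv_S_eq d hd arr.length hn]
  rw [hlist]
  -- both use the same max; A takes |min|, B takes min, and the min is a Nat cast, hence ≥ 0
  congr 1
  set L := (List.range 10).map (fun d => (((if d = 0 then 1 else 0) + pvCountFromOne d arr.length : Nat) : Int)) with hL
  have hne : L ≠ [] := by simp [hL]
  obtain ⟨mn, hmn⟩ : ∃ mn, PySem.List.min? L (fun x => x) = some mn := by
    rcases h : PySem.List.min? L (fun x => x) with _ | mn
    · exact absurd ((PySem.List.min?_eq_none_iff L (fun x => x)).mp h) hne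
    · exact ⟨mn, rfl⟩
  have hmem := PySem.List.min?_mem hmn
  rw [hL] at hmem
  simp only [List.mem_map] at hmem
  obtain ⟨d, _, hdm⟩ := hmem
  have h0 : 0 ≤ mn := by rw [← hdm]; positivity
  rw [hmn]
  simp [abs_of_nonneg h0]
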